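-- pv_equiv track=rewrite | github.com/xiaoshuai155vv/friday | scripts/evolution_meta_cross_engine_collaboration_global_optimizer.py | _find_deep_dependency_chains
-- ===== SOURCE A (Python) =====
-- from typing import Dict, List, Optional, Any, Set, Tuple
--
-- def _find_deep_dependency_chains(matrix: Dict) -> List[List[str]]:
--     """查找深层依赖链"""
--     chains = []
--
--     def dfs(engine, visited, current_chain):
--         if engine in visited:
--             return
--         visited.add(engine)
--         current_chain.append(engine)
--
--         deps = matrix.get(engine, {}).get("depends_on", [])
--         if len(deps) > 0:
--             for dep in deps:
--                 dfs(dep, visited.copy(), current_chain.copy())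
--         elif len(current_chain) >= 3:
--             chains.append(current_chain)
--
--     for engine in list(matrix.keys())[:50]:  # 限制搜索范围
--         dfs(engine, set(), [])
--
--     return chains[:10]  # 限制返回数量
-- ===== SOURCE B (Python) =====
-- def _find_deep_dependency_chains(matrix):
--     """Path-based DFS: the path itself serves as the visited set; leaf paths are
--     returned upward instead of being appended to a shared accumulator."""
--     def extend(path, engine):
--         if engine in path:
--             return []
--         path = path + [engine]
--         deps = matrix.get(engine, {}).get("depends_on", [])
--         if deps:
--             out = []
--             for d in deps:
--                 out += extend(path, d)
--             return out
--         return [path] if len(path) >= 3 else []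
--
--     chains = []
--     for engine in list(matrix.keys())[:50]:
--         chains += extend([], engine)
--     return chains[:10]
-- ===== Notes on version B (the rewrite author's own statement) =====
-- stated objective: alternative
-- what changed: A's DFS threads a separate visited set and a chain copy downward and mutates a shared results list at leaves; B drops the visited set entirely (the path is the visited set, membership is tested on the path) and returns leaf chains upward, concatenating the per-engine chain lists.
import Mathlib
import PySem

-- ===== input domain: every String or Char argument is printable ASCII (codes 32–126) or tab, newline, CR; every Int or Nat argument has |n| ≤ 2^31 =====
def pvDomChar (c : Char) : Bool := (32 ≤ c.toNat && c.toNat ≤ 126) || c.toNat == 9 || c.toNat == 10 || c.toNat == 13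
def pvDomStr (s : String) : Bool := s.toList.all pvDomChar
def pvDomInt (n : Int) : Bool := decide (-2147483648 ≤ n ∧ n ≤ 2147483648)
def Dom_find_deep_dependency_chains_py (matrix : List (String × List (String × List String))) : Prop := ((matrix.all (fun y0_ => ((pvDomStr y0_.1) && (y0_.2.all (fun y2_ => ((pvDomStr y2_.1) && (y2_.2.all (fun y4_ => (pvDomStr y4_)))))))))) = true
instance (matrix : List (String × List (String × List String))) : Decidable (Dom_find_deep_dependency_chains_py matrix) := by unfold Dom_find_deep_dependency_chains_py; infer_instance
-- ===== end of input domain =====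

-- B drops A's separate visited set (the path is the visited set) and returns leaf chains
-- upward instead of mutating a shared accumulator (objective: alternative decomposition,
-- same cost); equivalence of the return values is proved below.

-- termination helper facts (cited by the ports' decreasing_by):
-- number of matrix keys not yet visited (A's measure, over a PySem.Set)
def pvKeysRem (matrix : List (String × List (String × List String))) (v : PySem.Set String) : Nat :=
  ((matrix.map Prod.fst).filter (fun k => !(PySem.Set.contains v k))).length

-- number of matrix keys not on the current path (B's measure, over a plain list)
def pvKeysRemP (matrix : List (String × List (String × List String))) (path : List String) : Nat :=
  ((matrix.map Prod.fst).filter (fun k => !(path.contains k))).length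

theorem pvMemKeys_of_deps_ne (matrix : List (String × List (String × List String))) (engine : String)
    (h : PySem.Dict.getD (PySem.Dict.mk (PySem.Dict.getD (PySem.Dict.mk matrix) engine [])) "depends_on" [] ≠ []) :
    engine ∈ matrix.map Prod.fst := by
  by_contra hmem
  have hc : (PySem.Dict.mk matrix).contains engine = false := by
    rw [← Bool.not_eq_true, PySem.Dict.contains_iff_mem_keys]
    simpa [PySem.Dict.keys_mk] using hmem
  rw [PySem.Dict.getD_of_not_contains _ _ hc] at h
  exact h rfl

theorem pvKeysRem_lt (matrix : List (String × List (String × List String))) (v : PySem.Set String)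
    (engine : String) (hmem : engine ∈ matrix.map Prod.fst)
    (hc : ¬ PySem.Set.contains v engine = true) :
    pvKeysRem matrix (PySem.Set.add v engine) < pvKeysRem matrix v := by
  unfold pvKeysRem
  have hrw : (matrix.map Prod.fst).filter (fun k => !(PySem.Set.contains (PySem.Set.add v engine) k))
      = ((matrix.map Prod.fst).filter (fun k => !(PySem.Set.contains v k))).filter (fun k => !(k == engine)) := by
    rw [List.filter_filter]
    apply List.filter_congr
    intro k _
    by_cases hk : k = engine
    · subst hk
      simp
    · have hne : (k == engine) = false := by simp [hk]
      have heq : (PySem.Set.add v engine).contains k = v.contains k := by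
        cases hvk : v.contains k
        · cases hc2 : (PySem.Set.add v engine).contains k
          · rfl
          · exfalso
            rcases (PySem.Set.mem_add v engine k).mp ((PySem.Set.contains_iff _ _).mp hc2) with h | h
            · have h' := (PySem.Set.contains_iff v k).mpr h
              rw [hvk] at h'
              exact Bool.false_ne_true h'
            · exact hk h
        · exact (PySem.Set.contains_iff _ _).mpr
            ((PySem.Set.mem_add v engine k).mpr (Or.inl ((PySem.Set.contains_iff v k).mp hvk)))
      rw [show PySem.Set.contains (PySem.Set.add v engine) k = PySem.Set.contains v k from heq, hne]
      cases v.contains k <;> rfl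
  rw [hrw]
  have hin : engine ∈ (matrix.map Prod.fst).filter (fun k => !(PySem.Set.contains v k)) := by
    rw [List.mem_filter]
    refine ⟨hmem, ?_⟩
    cases hcv : PySem.Set.contains v engine
    · rfl
    · exact absurd hcv hc
  apply List.length_filter_lt_length_iff_exists.mpr
  exact ⟨engine, hin, by simp⟩

theorem pvKeysRemP_lt (matrix : List (String × List (String × List String))) (path : List String)
    (engine : String) (hmem : engine ∈ matrix.map Prod.fst)
    (hc : ¬ path.contains engine = true) :
    pvKeysRemP matrix (path ++ [engine]) < pvKeysRemP matrix path := by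
  unfold pvKeysRemP
  have hrw : (matrix.map Prod.fst).filter (fun k => !((path ++ [engine]).contains k))
      = ((matrix.map Prod.fst).filter (fun k => !(path.contains k))).filter (fun k => !(k == engine)) := by
    rw [List.filter_filter]
    apply List.filter_congr
    intro k _
    by_cases hk : k = engine
    · subst hk
      simp
    · simp [hk]
  rw [hrw]
  have hin : engine ∈ (matrix.map Prod.fst).filter (fun k => !(path.contains k)) := by
    rw [List.mem_filter]
    refine ⟨hmem, ?_⟩
    cases hcv : path.contains engine
    · rfl
    · exact absurd hcv hc
  apply List.length_filter_lt_length_iff_exists.mpr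
  exact ⟨engine, hin, by simp⟩

-- ===== PORT A =====
mutual
-- the recursive closure dfs(engine, visited, current_chain); `chains` is the shared mutable list
def pvDfsA (matrix : List (String × List (String × List String))) (engine : String)
    (visited : PySem.Set String) (chain : List String) (chains : List (List String)) : List (List String) :=
  if hc : PySem.Set.contains visited engine then chains
  else
    let visited' := PySem.Set.add visited engine
    let chain' := chain ++ [engine]
    let deps := PySem.Dict.getD (PySem.Dict.mk (PySem.Dict.getD (PySem.Dict.mk matrix) engine [])) "depends_on" []
    if hd : deps ≠ [] then pvDfsAFor matrix deps visited' chain' chains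
    else if 3 ≤ chain'.length then chains ++ [chain'] else chains
termination_by (pvKeysRem matrix visited, 0)
decreasing_by
  apply Prod.Lex.left
  exact pvKeysRem_lt matrix visited engine (pvMemKeys_of_deps_ne matrix engine hd) hc

-- the `for dep in deps:` loop of dfs
def pvDfsAFor (matrix : List (String × List (String × List String))) (deps : List String)
    (visited : PySem.Set String) (chain : List String) (chains : List (List String)) : List (List String) :=
  match deps with
  | [] => chains
  | d :: rest => pvDfsAFor matrix rest visited chain (pvDfsA matrix d visited chain chains)
termination_by (pvKeysRem matrix visited, deps.length + 1)
decreasing_by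
  all_goals apply Prod.Lex.right
  all_goals simp
end

def find_deep_dependency_chains_py (matrix : List (String × List (String × List String))) : List (List String) :=
  (((PySem.Dict.mk matrix).keys.take 50).foldl
      (fun chains engine => pvDfsA matrix engine PySem.Set.empty [] chains) []).take 10

-- ===== PORT B =====
mutual
-- extend(path, engine): all complete chains reached by extending path with engine
def pvExtend (m : List (String × List (String × List String))) (path : List String)
    (engine : String) : List (List String) :=
  if hin : path.contains engine then []
  else
    let p := path ++ [engine]
    match hd : PySem.Dict.getD (PySem.Dict.mk (PySem.Dict.getD (PySem.Dict.mk m) engine [])) "depends_on" [] with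
    | [] => if 3 ≤ p.length then [p] else []
    | d :: rest => pvExtendLoop m p (d :: rest)
termination_by (pvKeysRemP m path, 0, 0)
decreasing_by
  apply Prod.Lex.left
  exact pvKeysRemP_lt m path engine
    (pvMemKeys_of_deps_ne m engine (by rw [hd]; exact List.cons_ne_nil d rest)) hin

-- the `for d in deps: out += extend(path, d)` loop
def pvExtendLoop (m : List (String × List (String × List String))) (p : List String)
    (deps : List String) : List (List String) :=
  match deps with
  | [] => []
  | d :: rest => pvExtend m p d ++ pvExtendLoop m p rest
termination_by (pvKeysRemP m p, 1, deps.length)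
decreasing_by
  · apply Prod.Lex.right
    apply Prod.Lex.left
    omega
  · apply Prod.Lex.right
    apply Prod.Lex.right
    simp
end

def find_deep_dependency_chains_py_alt (matrix : List (String × List (String × List String))) : List (List String) :=
  (((PySem.Dict.mk matrix).keys.take 50).foldl
      (fun chains engine => chains ++ pvExtend matrix [] engine) []).take 10

-- ===== PRECONDITION & SPEC =====
def Spec_find_deep_dependency_chains_py (matrix : List (String × List (String × List String))) (out : List (List String)) : Prop := out = find_deep_dependency_chains_py_alt matrix
instance (matrix : List (String × List (String × List String))) (out : List (List String)) : Decidable (Spec_find_deep_dependency_chains_py matrix out) := by unfold Spec_find_deep_dependency_chains_py; infer_instance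

-- ===== CLAIM (what is proved, stated in full; the proofs are below) =====
def Claim_equal_find_deep_dependency_chains_py : Prop := ∀ (matrix : List (String × List (String × List String))), Dom_find_deep_dependency_chains_py matrix → Spec_find_deep_dependency_chains_py matrix (find_deep_dependency_chains_py matrix)

-- ===== LEMMAS AND PROOFS =====

-- key invariant: A's visited set holds exactly the elements of A's current chain, which is
-- B's path; under that, A's accumulator DFS appends exactly B's returned chain list
theorem pvMain (n : Nat) : ∀ (m : List (String × List (String × List String))) (v : PySem.Set String)
    (chain : List String), pvKeysRem m v ≤ n →
    (∀ x, PySem.Set.contains v x = chain.contains x) →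
    (∀ e chains, pvDfsA m e v chain chains = chains ++ pvExtend m chain e)
    ∧ (∀ deps chains, pvDfsAFor m deps v chain chains = chains ++ pvExtendLoop m chain deps) := by
  induction n using Nat.strong_induction_on with
  | _ n IH =>
    intro m v chain hv hinv
    have hA : ∀ e chains, pvDfsA m e v chain chains = chains ++ pvExtend m chain e := by
      intro e chains
      rw [pvDfsA, pvExtend]
      set deps := PySem.Dict.getD (PySem.Dict.mk (PySem.Dict.getD (PySem.Dict.mk m) e [])) "depends_on" [] with hdeps
      by_cases hc : chain.contains e = true
      · rw [dif_pos ((hinv e).trans hc), dif_pos hc]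
        simp
      · rw [dif_neg (fun h => hc ((hinv e).symm.trans h)), dif_neg hc]
        have hinv' : ∀ x, PySem.Set.contains (PySem.Set.add v e) x = (chain ++ [e]).contains x := by
          intro x
          by_cases hx : (PySem.Set.add v e).contains x = true
          · rcases (PySem.Set.mem_add v e x).mp ((PySem.Set.contains_iff _ _).mp hx) with h | h
            · have := (hinv x).symm.trans ((PySem.Set.contains_iff v x).mpr h)
              rw [hx]
              simp [List.contains_eq_mem] at this ⊢
              exact Or.inl this
            · subst h
              rw [hx]
              simp
          · have hxv : ¬ PySem.Set.contains v x = true := fun h =>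
              hx ((PySem.Set.contains_iff _ _).mpr ((PySem.Set.mem_add v e x).mpr
                (Or.inl ((PySem.Set.contains_iff v x).mp h))))
            have hxe : x ≠ e := fun h =>
              hx ((PySem.Set.contains_iff _ _).mpr ((PySem.Set.mem_add v e x).mpr (Or.inr h)))
            have hxc : chain.contains x = false := by
              cases h : chain.contains x
              · rfl
              · exact absurd ((hinv x).trans h) hxv
            rw [Bool.eq_false_iff.mpr hx]
            simp [List.contains_eq_mem] at hxc ⊢
            exact ⟨hxc, hxe⟩
        match hdm : deps with
        | [] =>
          simp only [ne_eq, not_true_eq_false, dite_false]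
          split_ifs <;> simp
        | d :: rest =>
          rw [dif_pos (by exact List.cons_ne_nil d rest)]
          have hlt : pvKeysRem m (PySem.Set.add v e) < pvKeysRem m v :=
            pvKeysRem_lt m v e (pvMemKeys_of_deps_ne m e (by rw [← hdeps]; exact List.cons_ne_nil d rest))
              (fun h => hc ((hinv e).symm.trans h))
          exact ((IH (pvKeysRem m (PySem.Set.add v e)) (lt_of_lt_of_le hlt hv)
            m (PySem.Set.add v e) (chain ++ [e]) le_rfl hinv').2 (d :: rest) chains)
    refine ⟨hA, ?_⟩
    intro deps
    induction deps with
    | nil => intro chains; simp [pvDfsAFor, pvExtendLoop]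
    | cons d rest ih =>
      intro chains
      rw [pvDfsAFor, ih, pvExtendLoop, hA]
      simp

-- ===== VERDICT (by name: the statement is the Claim_ definition above) =====
theorem find_deep_dependency_chains_py_spec : Claim_equal_find_deep_dependency_chains_py := by
  intro m _
  unfold Spec_find_deep_dependency_chains_py find_deep_dependency_chains_py find_deep_dependency_chains_py_alt
  have hpt : ∀ e chains, pvDfsA m e PySem.Set.empty [] chains = chains ++ pvExtend m [] e :=
    fun e chains =>
      (pvMain (pvKeysRem m PySem.Set.empty) m PySem.Set.empty [] le_rfl (fun x => rfl)).1 e chains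
  have hfold : ∀ (ks : List String) (chains : List (List String)),
      ks.foldl (fun chains engine => pvDfsA m engine PySem.Set.empty [] chains) chains
        = ks.foldl (fun chains engine => chains ++ pvExtend m [] engine) chains := by
    intro ks
    induction ks with
    | nil => intro chains; rfl
    | cons e rest ih => intro chains; rw [List.foldl_cons, List.foldl_cons, hpt, ih]
  rw [hfold]
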